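-- pv_equiv track=rewrite | github.com/razzlestorm/code-challenges | twoStrings_Easy/solution.py | twoStrings
-- ===== SOURCE A (Python) =====
-- def twoStrings(s1, s2):
--   count = 0
--   s1_subs = get_substrings(s1)
--
--   s2_subs = get_substrings(s2)
--
--   for sub in s1_subs:
--     if sub in s2_subs:
--       count += 1
--
--   return count
--
-- def get_substrings(s):
--   # range([start], stop[, step])
--   subs = set()
--   for start in range(len(s)):
--     for end in range(start+1, len(s)+1):
--       subs.add(s[start:end])
--
--   return subs
-- ===== SOURCE B (Python) =====
-- def twoStrings(s1, s2):
--   common = set()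
--   for i in range(len(s1)):
--     for j in range(i + 1, len(s1) + 1):
--       sub = s1[i:j]
--       if sub in s2:
--         common.add(sub)
--       else:
--         break
--   return len(common)
-- ===== Notes on version B (the rewrite author's own statement) =====
-- stated objective: alternative
-- what changed: B never builds s2's substring set: for each start position of s1 it extends the substring while it still occurs in s2 (Python substring containment), breaking off the inner loop at the first failure since every longer extension must then fail too, and collects the matches into a single set.
import Mathlib
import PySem

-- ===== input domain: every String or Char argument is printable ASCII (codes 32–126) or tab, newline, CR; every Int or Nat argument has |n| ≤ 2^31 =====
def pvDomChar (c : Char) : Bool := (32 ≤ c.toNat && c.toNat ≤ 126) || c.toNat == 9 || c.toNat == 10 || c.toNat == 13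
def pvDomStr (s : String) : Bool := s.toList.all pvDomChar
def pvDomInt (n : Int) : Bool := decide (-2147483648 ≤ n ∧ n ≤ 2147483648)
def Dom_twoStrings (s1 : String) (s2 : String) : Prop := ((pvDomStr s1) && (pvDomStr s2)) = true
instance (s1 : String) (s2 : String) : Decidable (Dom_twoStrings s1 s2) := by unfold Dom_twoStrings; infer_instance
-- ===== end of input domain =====

-- B builds no substring set for s2: it extends each start position of s1 while the substring
-- still occurs in s2 (substring containment; a failed prefix lets it break early) into one set.

-- ===== PORT A =====
def getSubstrings (s : String) : PySem.Set String :=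
  (PySem.List.pyRange 0 (PySem.Str.len s) 1).foldl
    (fun subs start =>
      (PySem.List.pyRange (start + 1) (PySem.Str.len s + 1) 1).foldl
        (fun subs e => PySem.Set.add subs (PySem.Str.slice s (some start) (some e))) subs)
    PySem.Set.empty

def twoStrings (s1 : String) (s2 : String) : Int :=
  let s1_subs := getSubstrings s1
  let s2_subs := getSubstrings s2
  s1_subs.foldl (fun count sub => if PySem.Set.contains s2_subs sub then count + 1 else count) 0

-- inner 'for j … else break' loop of B
def twoStringsExtend (s1 : String) (s2 : String) (i : Int) (common : PySem.Set String)
    (js : List Int) : PySem.Set String :=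
  match js with
  | [] => common
  | j :: rest =>
    let sub := PySem.Str.slice s1 (some i) (some j)
    if PySem.Str.isIn sub s2 then twoStringsExtend s1 s2 i (PySem.Set.add common sub) rest
    else common

def twoStrings_alt (s1 : String) (s2 : String) : Int :=
  let common := (PySem.List.pyRange 0 (PySem.Str.len s1) 1).foldl
    (fun common i =>
      twoStringsExtend s1 s2 i common (PySem.List.pyRange (i + 1) (PySem.Str.len s1 + 1) 1))
    PySem.Set.empty
  PySem.Set.len common


-- ===== PRECONDITION & SPEC =====
def Spec_twoStrings (s1 : String) (s2 : String) (out : Int) : Prop := out = twoStrings_alt s1 s2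
instance (s1 : String) (s2 : String) (out : Int) : Decidable (Spec_twoStrings s1 s2 out) := by unfold Spec_twoStrings; infer_instance

-- ===== CLAIM (what is proved, stated in full; the proofs are below) =====
def Claim_equal_twoStrings : Prop := ∀ (s1 : String) (s2 : String), Dom_twoStrings s1 s2 → Spec_twoStrings s1 s2 (twoStrings s1 s2)

-- ===== LEMMAS AND PROOFS =====
theorem extend_eq_takeWhile (s1 s2 : String) (i : Int) (acc : PySem.Set String) (js : List Int) :
    twoStringsExtend s1 s2 i acc js
      = (js.takeWhile (fun j => PySem.Str.isIn (PySem.Str.slice s1 (some i) (some j)) s2)).foldl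
          (fun s j => PySem.Set.add s (PySem.Str.slice s1 (some i) (some j))) acc := by
  induction js generalizing acc with
  | nil => simp [twoStringsExtend]
  | cons j rest ih =>
    rw [twoStringsExtend, List.takeWhile_cons]
    by_cases h : PySem.Str.isIn (PySem.Str.slice s1 (some i) (some j)) s2 = true
    · simp only [h, if_true, ih, List.foldl_cons]
    · simp only [h, if_false]
      simp [h]

theorem takeWhile_eq_filter_of_mono {α : Type} (P : α → Bool) (js : List α)
    (h : js.Pairwise (fun a b => P b = true → P a = true)) :
    js.takeWhile P = js.filter P := by
  induction js with
  | nil => rfl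
  | cons j t ih =>
    rw [List.pairwise_cons] at h
    rw [List.takeWhile_cons, List.filter_cons]
    by_cases hj : P j = true
    · simp [hj, ih h.2]
    · simp only [hj, if_false]
      have : t.filter P = [] := by
        rw [List.filter_eq_nil_iff]
        intro b hb hPb
        exact hj (h.1 b hb hPb)
      simp [hj, this]

-- prefix monotonicity: if a longer slice from i occurs in s2, so does a shorter one
theorem slice_mono_isIn (s1 s2 : String) (i a b : Int) (hi : 0 ≤ i) (hab : i ≤ a) (h : a ≤ b)
    (hb : PySem.Str.isIn (PySem.Str.slice s1 (some i) (some b)) s2 = true) :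
    PySem.Str.isIn (PySem.Str.slice s1 (some i) (some a)) s2 = true := by
  rw [PySem.Str.isIn_iff_infix] at hb ⊢
  obtain ⟨i', rfl⟩ : ∃ n : Nat, i = (n : Int) := ⟨i.toNat, (Int.toNat_of_nonneg hi).symm⟩
  obtain ⟨a', rfl⟩ : ∃ n : Nat, a = (n : Int) := ⟨a.toNat, (Int.toNat_of_nonneg (by omega)).symm⟩
  obtain ⟨b', rfl⟩ : ∃ n : Nat, b = (n : Int) := ⟨b.toNat, (Int.toNat_of_nonneg (by omega)).symm⟩
  rw [PySem.Str.toList_slice, PySem.Chars.slice_eq_listSlice, PySem.List.slice_natCast] at hb ⊢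
  have hpre : List.take (a' - i') (List.drop i' s1.toList)
      <+: List.take (b' - i') (List.drop i' s1.toList) :=
    List.take_prefix_take_left (by omega)
  exact (hpre.isInfix).trans hb
  -- wait: need prefix-of-infix is infix; hb : take(b'-i')… <:+: s2.toList

theorem filter_foldl_add {α : Type} [BEq α] [LawfulBEq α] (p : α → Bool) (l : List α)
    (acc : PySem.Set α) :
    (l.foldl PySem.Set.add acc).filter p = (l.filter p).foldl PySem.Set.add (acc.filter p) := by
  induction l generalizing acc with
  | nil => rfl
  | cons x t ih =>
    rw [List.foldl_cons, List.filter_cons, ih]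
    by_cases hx : p x = true
    · simp only [hx, if_true, List.foldl_cons]
      congr 1
      unfold PySem.Set.add
      by_cases hmem : x ∈ acc
      · have h2 : x ∈ acc.filter p := List.mem_filter.mpr ⟨hmem, hx⟩
        simp [hmem, h2]
      · have h2 : x ∉ acc.filter p := fun hc => hmem (List.mem_filter.mp hc).1
        simp [hmem, h2, List.filter_append, hx]
    · simp only [hx, if_false]
      congr 1
      unfold PySem.Set.add
      by_cases hmem : x ∈ acc
      · simp [hmem]
      · simp [hmem, List.filter_append, hx]

theorem ofList_filter {α : Type} [BEq α] [LawfulBEq α] (p : α → Bool) (l : List α) :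
    PySem.Set.ofList (l.filter p) = (PySem.Set.ofList l).filter p := by
  rw [PySem.Set.ofList_eq_foldl, PySem.Set.ofList_eq_foldl, filter_foldl_add]
  rfl

theorem mem_foldl_set_add {α β : Type} [BEq β] [LawfulBEq β] (f : α → β) (l : List α)
    (acc : PySem.Set β) (x : β) :
    x ∈ l.foldl (fun s a => PySem.Set.add s (f a)) acc ↔ x ∈ acc ∨ ∃ a ∈ l, x = f a := by
  induction l generalizing acc with
  | nil => simp
  | cons h t ih => simp [List.foldl_cons, ih, PySem.Set.mem_add]; tauto

theorem mem_foldl_nested {α β γ : Type} [BEq γ] [LawfulBEq γ] (f : α → β → γ)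
    (g : α → List β) (l : List α) (acc : PySem.Set γ) (x : γ) :
    x ∈ l.foldl (fun s a => (g a).foldl (fun s b => PySem.Set.add s (f a b)) s) acc ↔
      x ∈ acc ∨ ∃ a ∈ l, ∃ b ∈ g a, x = f a b := by
  induction l generalizing acc with
  | nil => simp
  | cons h t ih => simp [List.foldl_cons, ih, mem_foldl_set_add]; exact or_assoc

theorem mem_getSubstrings (s : String) (x : String) :
    x ∈ getSubstrings s ↔ x.toList ≠ [] ∧ x.toList <:+: s.toList := by
  rw [getSubstrings, mem_foldl_nested]
  constructor
  · rintro (h | ⟨i, hi, j, hj, rfl⟩)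
    · simp [PySem.Set.empty] at h
    · rw [PySem.List.mem_pyRange_one] at hi hj
      rw [PySem.Str.len_eq] at hi hj
      obtain ⟨i', rfl⟩ : ∃ n : Nat, i = (n : Int) := ⟨i.toNat, (Int.toNat_of_nonneg hi.1).symm⟩
      obtain ⟨j', rfl⟩ : ∃ n : Nat, j = (n : Int) := ⟨j.toNat, (Int.toNat_of_nonneg (by omega)).symm⟩
      rw [PySem.Str.toList_slice, PySem.Chars.slice_eq_listSlice, PySem.List.slice_natCast]
      constructor
      · apply List.ne_nil_of_length_pos
        rw [List.length_take, List.length_drop]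
        omega
      · exact ((List.take_prefix _ _).isInfix).trans (List.drop_suffix _ _).isInfix
  · rintro ⟨hne, a, b, hab⟩
    refine Or.inr ⟨(a.length : Int), ?_, ((a.length + x.toList.length : Nat) : Int), ?_, ?_⟩
    · rw [PySem.List.mem_pyRange_one, PySem.Str.len_eq, ← hab]
      have hx : x.toList.length ≠ 0 := by simpa using hne
      rw [List.length_append, List.length_append]
      push_cast; omega
    · rw [PySem.List.mem_pyRange_one, PySem.Str.len_eq, ← hab]
      have hx : x.toList.length ≠ 0 := by simpa using hne
      rw [List.length_append, List.length_append]
      push_cast; omega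
    · apply String.toList_inj.mp
      rw [PySem.Str.toList_slice, PySem.Chars.slice_eq_listSlice, PySem.List.slice_natCast, ← hab]
      rw [List.append_assoc, List.drop_left, Nat.add_sub_cancel_left, List.take_left]

theorem foldl_nested_eq_ofList_flatMap {α β γ : Type} [BEq γ] [LawfulBEq γ]
    (l : List α) (g : α → List β) (f : α → β → γ) :
    l.foldl (fun s a => (g a).foldl (fun s b => PySem.Set.add s (f a b)) s) PySem.Set.empty
      = PySem.Set.ofList (l.flatMap (fun a => (g a).map (f a))) := by
  rw [PySem.Set.ofList_eq_foldl]
  rw [List.flatMap, List.foldl_flatten, List.foldl_map]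
  simp [List.foldl_map, PySem.Set.empty]

theorem common_eq (s1 s2 : String) :
    (PySem.List.pyRange 0 (PySem.Str.len s1) 1).foldl
      (fun common i =>
        twoStringsExtend s1 s2 i common (PySem.List.pyRange (i + 1) (PySem.Str.len s1 + 1) 1))
      PySem.Set.empty
    = PySem.Set.ofList
        (((PySem.List.pyRange 0 (PySem.Str.len s1) 1).flatMap (fun i =>
          (PySem.List.pyRange (i + 1) (PySem.Str.len s1 + 1) 1).map (fun j =>
            PySem.Str.slice s1 (some i) (some j)))).filter
          (fun sub => PySem.Str.isIn sub s2)) := by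
  have step : ∀ (acc : PySem.Set String) (i : Int),
      i ∈ PySem.List.pyRange 0 (PySem.Str.len s1) 1 →
      twoStringsExtend s1 s2 i acc (PySem.List.pyRange (i + 1) (PySem.Str.len s1 + 1) 1)
        = (((PySem.List.pyRange (i + 1) (PySem.Str.len s1 + 1) 1).map
              (fun j => PySem.Str.slice s1 (some i) (some j))).filter
            (fun sub => PySem.Str.isIn sub s2)).foldl PySem.Set.add acc := by
    intro acc i hi
    rw [PySem.List.mem_pyRange_one] at hi
    rw [extend_eq_takeWhile]
    rw [takeWhile_eq_filter_of_mono]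
    · rw [List.filter_map]
      rw [List.foldl_map]
      rfl
    · apply List.Pairwise.imp_of_mem (R := (· < ·))
      · intro a b ha hb hab hPb
        rw [PySem.List.mem_pyRange_one] at ha hb
        exact slice_mono_isIn s1 s2 i a b (by omega) (by omega) (by omega) hPb
      · rw [PySem.List.pyRange_one]
        exact List.pairwise_lt_range.map _ (by intro a b h; omega)
  rw [PySem.List.foldl_congr_mem _
    (fun common i =>
      twoStringsExtend s1 s2 i common (PySem.List.pyRange (i + 1) (PySem.Str.len s1 + 1) 1))
    (fun acc i =>
      (((PySem.List.pyRange (i + 1) (PySem.Str.len s1 + 1) 1).map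
          (fun j => PySem.Str.slice s1 (some i) (some j))).filter
        (fun sub => PySem.Str.isIn sub s2)).foldl PySem.Set.add acc)
    PySem.Set.empty step]
  rw [List.flatMap, List.filter_flatten, PySem.Set.ofList_eq_foldl, List.foldl_flatten,
    List.foldl_map, List.foldl_map]
  rfl

theorem twoStrings_eq_alt (s1 s2 : String) : twoStrings s1 s2 = twoStrings_alt s1 s2 := by
  have hset : getSubstrings s1
      = PySem.Set.ofList ((PySem.List.pyRange 0 (PySem.Str.len s1) 1).flatMap (fun i =>
          (PySem.List.pyRange (i + 1) (PySem.Str.len s1 + 1) 1).map (fun j =>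
            PySem.Str.slice s1 (some i) (some j)))) := by
    rw [getSubstrings]
    exact foldl_nested_eq_ofList_flatMap _ _ _
  unfold twoStrings twoStrings_alt
  rw [common_eq, ofList_filter, ← hset]
  rw [PySem.List.foldl_if_add_one]
  have hcong : ∀ sub ∈ getSubstrings s1,
      (PySem.Set.contains (getSubstrings s2) sub = true ↔ PySem.Str.isIn sub s2 = true) := by
    intro sub hsub
    have h1 := (mem_getSubstrings s1 sub).mp hsub
    rw [PySem.Set.contains_iff, mem_getSubstrings, PySem.Str.isIn_iff_infix]
    exact ⟨fun h => h.2, fun h => ⟨h1.1, h⟩⟩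
  rw [List.countP_congr hcong, List.countP_eq_length_filter]
  simp [PySem.Set.len]

-- ===== VERDICT (by name: the statement is the Claim_ definition above) =====
theorem twoStrings_spec : Claim_equal_twoStrings := by
  intro s1 s2 _
  exact twoStrings_eq_alt s1 s2
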